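-- pv_equiv track=rewrite | github.com/smitjivani/nlqtosql_common | tecod_utils.py | get_sub_sqls
-- ===== SOURCE A (Python) =====
-- def get_sub_sqls(template_tokens, sql_literal_indices):
--     """
--     Get the SQL template and literal indices for a sub-template.    "
--     """
--     # convert sql literal indices from list of tuples to 1d list
--     sql_literal_indices = [item for sublist in sql_literal_indices for item in sublist]
--     sql_literal_indices.insert(0, 0) # add the start of the template tokens
--     sql_literal_indices.append(len(template_tokens)) # add the end of the template tokens
--
--     sub_sql = []
--     for i in range(0, len(sql_literal_indices), 2):
--         sub_sql.append(template_tokens[sql_literal_indices[i]:sql_literal_indices[i+1]])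
--
--     return sub_sql
-- ===== SOURCE B (Python) =====
-- def get_sub_sqls(template_tokens, sql_literal_indices):
--     """
--     Get the SQL template and literal indices for a sub-template.    "
--     """
--     sub_sql = []
--     prev = 0
--     for t in sql_literal_indices:
--         sub_sql.append(template_tokens[prev:t[0]])
--         prev = t[1]
--     sub_sql.append(template_tokens[prev:len(template_tokens)])
--     return sub_sql
-- ===== Notes on version B (the rewrite author's own statement) =====
-- stated objective: simpler
-- what changed: Loops directly over the (start, end) pairs with a running 'prev' boundary accumulator, appending one gap slice per pair and a final tail slice, instead of flattening the pairs into a 1-d boundary list with inserted 0/len sentinels and indexing it with a stride-2 range loop.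
import Mathlib
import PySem

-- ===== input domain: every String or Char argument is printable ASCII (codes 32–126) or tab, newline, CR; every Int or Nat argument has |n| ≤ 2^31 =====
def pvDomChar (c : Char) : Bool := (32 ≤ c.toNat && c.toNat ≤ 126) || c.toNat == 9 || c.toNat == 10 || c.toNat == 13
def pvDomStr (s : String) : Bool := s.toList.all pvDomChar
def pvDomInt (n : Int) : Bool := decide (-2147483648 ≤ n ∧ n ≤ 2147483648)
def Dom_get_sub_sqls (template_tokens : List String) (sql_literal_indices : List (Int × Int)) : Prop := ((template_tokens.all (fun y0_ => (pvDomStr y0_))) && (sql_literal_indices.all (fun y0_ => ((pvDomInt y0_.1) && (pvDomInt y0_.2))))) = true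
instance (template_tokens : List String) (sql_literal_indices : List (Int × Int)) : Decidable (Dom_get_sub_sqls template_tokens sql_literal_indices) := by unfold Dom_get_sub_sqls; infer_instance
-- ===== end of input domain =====

-- B replaces A's flattened boundary list with sentinels and stride-2 indexing by a direct
-- loop over the (start, end) pairs with a running 'prev' boundary accumulator (simpler).


-- ===== PORT A =====
def get_sub_sqls (template_tokens : List String) (sql_literal_indices : List (Int × Int)) : List (List String) :=
  -- [item for sublist in sql_literal_indices for item in sublist]
  let indices : List Int := sql_literal_indices.flatMap (fun sublist => [sublist.1, sublist.2])
  -- sql_literal_indices.insert(0, 0)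
  let indices := PySem.List.insert indices 0 0
  -- sql_literal_indices.append(len(template_tokens))
  let indices := indices ++ [(template_tokens.length : Int)]
  -- for i in range(0, len(...), 2): sub_sql.append(template_tokens[indices[i]:indices[i+1]])
  -- (pyGetD is exact here: i and i+1 are always in range since the list length is even)
  (PySem.List.pyRange 0 (indices.length : Int) 2).foldl
    (fun sub_sql i =>
      sub_sql ++ [PySem.List.slice template_tokens
        (some (PySem.List.pyGetD indices i 0))
        (some (PySem.List.pyGetD indices (i + 1) 0))]) []

-- ===== PORT B =====
def get_sub_sqls_alt (template_tokens : List String) (sql_literal_indices : List (Int × Int)) : List (List String) :=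
  let st := sql_literal_indices.foldl
    (fun (st : List (List String) × Int) t =>
      (st.1 ++ [PySem.List.slice template_tokens (some st.2) (some t.1)], t.2))
    ([], 0)
  st.1 ++ [PySem.List.slice template_tokens (some st.2) (some (template_tokens.length : Int))]

-- ===== PRECONDITION & SPEC =====
def Spec_get_sub_sqls (template_tokens : List String) (sql_literal_indices : List (Int × Int)) (out : List (List String)) : Prop := out = get_sub_sqls_alt template_tokens sql_literal_indices
instance (template_tokens : List String) (sql_literal_indices : List (Int × Int)) (out : List (List String)) : Decidable (Spec_get_sub_sqls template_tokens sql_literal_indices out) := by unfold Spec_get_sub_sqls; infer_instance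

-- ===== CLAIM (what is proved, stated in full; the proofs are below) =====
def Claim_equal_get_sub_sqls : Prop := ∀ (template_tokens : List String) (sql_literal_indices : List (Int × Int)), Dom_get_sub_sqls template_tokens sql_literal_indices → Spec_get_sub_sqls template_tokens sql_literal_indices (get_sub_sqls template_tokens sql_literal_indices)

-- ===== LEMMAS AND PROOFS =====

-- the common gap-segment list both programs produce
def pvSegs (tt : List String) (prev : Int) : List (Int × Int) → List (List String)
  | [] => [PySem.List.slice tt (some prev) (some (tt.length : Int))]
  | p :: rest => PySem.List.slice tt (some prev) (some p.1) :: pvSegs tt p.2 rest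

-- B's fold produces the segment list
lemma pvB_fold (tt : List String) :
    ∀ (pairs : List (Int × Int)) (prev : Int) (acc : List (List String)),
      (let st := pairs.foldl
          (fun (st : List (List String) × Int) t =>
            (st.1 ++ [PySem.List.slice tt (some st.2) (some t.1)], t.2)) (acc, prev);
        st.1 ++ [PySem.List.slice tt (some st.2) (some (tt.length : Int))])
      = acc ++ pvSegs tt prev pairs := by
  intro pairs
  induction pairs with
  | nil => intro prev acc; simp [pvSegs]
  | cons p rest ih =>
      intro prev acc
      simp only [List.foldl_cons]
      rw [ih p.2 (acc ++ [PySem.List.slice tt (some prev) (some p.1)])]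
      simp [pvSegs]

-- A's stride-2 indexing fold produces the same segment list
lemma pvA_fold (tt : List String) :
    ∀ (pairs : List (Int × Int)) (prev : Int) (acc : List (List String)),
      ((List.range (pairs.length + 1)).foldl
        (fun sub k =>
          sub ++ [PySem.List.slice tt
            (some ((prev :: pairs.flatMap (fun p => [p.1, p.2]) ++ [(tt.length : Int)]).getD (2 * k) 0))
            (some ((prev :: pairs.flatMap (fun p => [p.1, p.2]) ++ [(tt.length : Int)]).getD (2 * k + 1) 0))]) acc)
      = acc ++ pvSegs tt prev pairs := by
  intro pairs
  induction pairs with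
  | nil => intro prev acc; simp [pvSegs, List.range_succ]
  | cons p rest ih =>
      intro prev acc
      rw [List.length_cons, List.range_succ_eq_map]
      simp only [List.foldl_cons, List.foldl_map]
      have hfun :
          (fun (sub : List (List String)) (k : Nat) =>
            sub ++ [PySem.List.slice tt
              (some ((prev :: (p :: rest).flatMap (fun p => [p.1, p.2]) ++ [(tt.length : Int)]).getD (2 * (Nat.succ k)) 0))
              (some ((prev :: (p :: rest).flatMap (fun p => [p.1, p.2]) ++ [(tt.length : Int)]).getD (2 * (Nat.succ k) + 1) 0))])
          = (fun (sub : List (List String)) (k : Nat) =>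
            sub ++ [PySem.List.slice tt
              (some ((p.2 :: rest.flatMap (fun p => [p.1, p.2]) ++ [(tt.length : Int)]).getD (2 * k) 0))
              (some ((p.2 :: rest.flatMap (fun p => [p.1, p.2]) ++ [(tt.length : Int)]).getD (2 * k + 1) 0))]) := by
        funext sub k
        have h2 : 2 * (Nat.succ k) = (2 * k) + 1 + 1 := by omega
        have h3 : 2 * (Nat.succ k) + 1 = (2 * k + 1) + 1 + 1 := by omega
        rw [h3, h2]
        simp
      rw [hfun]
      have hstart :
          (acc ++ [PySem.List.slice tt
            (some ((prev :: (p :: rest).flatMap (fun p => [p.1, p.2]) ++ [(tt.length : Int)]).getD (2 * 0) 0))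
            (some ((prev :: (p :: rest).flatMap (fun p => [p.1, p.2]) ++ [(tt.length : Int)]).getD (2 * 0 + 1) 0))])
          = acc ++ [PySem.List.slice tt (some prev) (some p.1)] := by
        simp
      rw [hstart, ih p.2 (acc ++ [PySem.List.slice tt (some prev) (some p.1)])]
      simp [pvSegs]

-- PySem.List.insert at index 0 is cons
lemma pvInsert_zero {α : Type} (xs : List α) (v : α) :
    PySem.List.insert xs 0 v = v :: xs := by
  simp [PySem.List.insert, PySem.List.sliceIndices]

-- ===== VERDICT (by name: the statement is the Claim_ definition above) =====
theorem get_sub_sqls_spec : Claim_equal_get_sub_sqls := by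
  intro tt idx _
  unfold Spec_get_sub_sqls get_sub_sqls get_sub_sqls_alt
  simp only [pvInsert_zero]
  rw [pvB_fold tt idx 0 []]
  set flat : List Int := (0 : Int) :: idx.flatMap (fun p => [p.1, p.2]) ++ [(tt.length : Int)] with hflat
  have hlen : flat.length = 2 * idx.length + 2 := by
    simp [hflat, List.length_flatMap]
    induction idx with
    | nil => simp
    | cons p rest _ih => simp; omega
  rw [PySem.List.pyRange_of_pos 0 (flat.length : Int) (by norm_num)]
  have hcount : (if (0 : Int) < (flat.length : Int)
      then ((((flat.length : Int) - 0 + 2 - 1) / 2)).toNat else 0) = idx.length + 1 := by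
    rw [hlen]; push_cast; rw [if_pos (by omega)]; omega
  rw [hcount, List.foldl_map]
  have hfun :
      (fun (sub : List (List String)) (k : Nat) =>
        sub ++ [PySem.List.slice tt
          (some (PySem.List.pyGetD flat (0 + 2 * (k : Int)) 0))
          (some (PySem.List.pyGetD flat (0 + 2 * (k : Int) + 1) 0))])
      = (fun (sub : List (List String)) (k : Nat) =>
        sub ++ [PySem.List.slice tt
          (some (flat.getD (2 * k) 0))
          (some (flat.getD (2 * k + 1) 0))]) := by
    funext sub k
    have e1 : (0 + 2 * (k : Int)) = ((2 * k : Nat) : Int) := by push_cast; ring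
    have e2 : (0 + 2 * (k : Int) + 1) = ((2 * k + 1 : Nat) : Int) := by push_cast; ring
    rw [e2, e1, PySem.List.pyGetD_natCast, PySem.List.pyGetD_natCast]
  rw [hfun]
  exact pvA_fold tt idx 0 []
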